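-- pv_equiv track=rewrite | github.com/NatanFA/ProgramasPython | PS101.py | trocamatriz3
-- ===== SOURCE A (Python) =====
-- def trocamatriz3(matriz1, matriz2, i, j):
--     if (i<0):
--         return matriz1, matriz2
--     if matriz2[i][j] != "X" and matriz2[i][j] != ".":
--         if matriz2[i][j] == "#":
--             return matriz1, matriz2
--         else:
--             matriz1[i][j] = "X"
--     return trocamatriz3(matriz1, matriz2, i-1, j)
-- ===== SOURCE B (Python) =====
-- def trocamatriz3(matriz1, matriz2, i, j):
--     for ii in range(i, -1, -1):
--         c = matriz2[ii][j]
--         if c == "#":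
--             break
--         if c != "X" and c != ".":
--             matriz1[ii][j] = "X"
--     return matriz1, matriz2
-- ===== Notes on version B (the rewrite author's own statement) =====
-- stated objective: simpler
-- what changed: Replaced A's recursion (one call frame per row) by a single iterative for-loop over range(i, -1, -1) with a break on '#'.
import Mathlib
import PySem

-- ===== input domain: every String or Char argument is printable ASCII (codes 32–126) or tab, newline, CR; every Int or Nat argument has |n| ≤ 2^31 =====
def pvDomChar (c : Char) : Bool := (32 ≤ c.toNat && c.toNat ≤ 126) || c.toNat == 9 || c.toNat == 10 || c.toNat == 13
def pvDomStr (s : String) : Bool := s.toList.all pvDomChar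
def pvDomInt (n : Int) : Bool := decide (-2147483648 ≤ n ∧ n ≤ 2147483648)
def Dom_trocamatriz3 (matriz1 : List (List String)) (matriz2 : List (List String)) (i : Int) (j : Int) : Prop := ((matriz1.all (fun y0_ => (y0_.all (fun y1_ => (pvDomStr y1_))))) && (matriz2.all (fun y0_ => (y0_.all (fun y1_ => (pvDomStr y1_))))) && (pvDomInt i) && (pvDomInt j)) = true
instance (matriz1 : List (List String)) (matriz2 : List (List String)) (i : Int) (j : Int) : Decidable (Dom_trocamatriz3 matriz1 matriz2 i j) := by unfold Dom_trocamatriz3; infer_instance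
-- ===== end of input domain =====

-- B replaces A's recursion by an iterative downward loop with a break on '#' (simpler decomposition).
-- Equivalence is about the RETURN value; the Python A mutates matriz1 in place and B performs the same mutation.

-- ===== PORT A =====
-- literal port of A's recursion; pyGetD/pySetD are exact under Pre_ (every index actually accessed is in range)
def trocamatriz3 (matriz1 : List (List String)) (matriz2 : List (List String)) (i : Int) (j : Int) : List (List String) × List (List String) :=
  if i < 0 then (matriz1, matriz2)
  else
    let c := PySem.List.pyGetD (PySem.List.pyGetD matriz2 i []) j ""
    if c ≠ "X" ∧ c ≠ "." then
      if c = "#" then (matriz1, matriz2)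
      else
        trocamatriz3 (PySem.List.pySetD matriz1 i (PySem.List.pySetD (PySem.List.pyGetD matriz1 i []) j "X")) matriz2 (i-1) j
    else trocamatriz3 matriz1 matriz2 (i-1) j
termination_by (i+1).toNat
decreasing_by all_goals omega

-- ===== PORT B =====
-- the loop body of Source B over the list range(i, -1, -1); returning matriz1 early models 'break'
def trocaLoop (matriz2 : List (List String)) (j : Int) (matriz1 : List (List String)) : List Int → List (List String)
  | [] => matriz1
  | ii :: rest =>
    let c := PySem.List.pyGetD (PySem.List.pyGetD matriz2 ii []) j ""
    if c = "#" then matriz1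
    else if c ≠ "X" ∧ c ≠ "." then
      trocaLoop matriz2 j (PySem.List.pySetD matriz1 ii (PySem.List.pySetD (PySem.List.pyGetD matriz1 ii []) j "X")) rest
    else trocaLoop matriz2 j matriz1 rest

def trocamatriz3_alt (matriz1 : List (List String)) (matriz2 : List (List String)) (i : Int) (j : Int) : List (List String) × List (List String) :=
  (trocaLoop matriz2 j matriz1 (PySem.List.pyRange i (-1) (-1)), matriz2)

-- ===== PRECONDITION & SPEC =====
-- Pre_ excludes exactly the inputs on which A raises IndexError: a row ii ≤ i (and column j in it,
-- and in matriz1 when the cell is written) must be in range ONLY when no '#' in column j of a row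
-- strictly between ii and i stops the scan before row ii is ever touched.
-- the first conjunct (implied by the rest: row i itself must be readable when 0 ≤ i) lets the
-- Decidable instance fail fast instead of enumerating a huge range for large i
def Pre_trocamatriz3 (matriz1 : List (List String)) (matriz2 : List (List String)) (i : Int) (j : Int) : Prop :=
  i < (matriz2.length : Int) ∧
  ∀ ii ∈ List.range (i+1).toNat,
    (∀ k ∈ List.range (i+1).toNat, ii < k →
        PySem.List.pyGetD (PySem.List.pyGetD matriz2 (k : Int) []) j "" ≠ "#") →
    (PySem.Raise.InRange matriz2.length (ii : Int) ∧
     PySem.Raise.InRange (PySem.List.pyGetD matriz2 (ii : Int) []).length j ∧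
     ((PySem.List.pyGetD (PySem.List.pyGetD matriz2 (ii : Int) []) j "" ≠ "X" ∧
       PySem.List.pyGetD (PySem.List.pyGetD matriz2 (ii : Int) []) j "" ≠ "." ∧
       PySem.List.pyGetD (PySem.List.pyGetD matriz2 (ii : Int) []) j "" ≠ "#") →
      PySem.Raise.InRange matriz1.length (ii : Int) ∧
      PySem.Raise.InRange (PySem.List.pyGetD matriz1 (ii : Int) []).length j))
instance (matriz1 : List (List String)) (matriz2 : List (List String)) (i : Int) (j : Int) : Decidable (Pre_trocamatriz3 matriz1 matriz2 i j) := by unfold Pre_trocamatriz3; infer_instance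

def pvWitness_trocamatriz3 : List (List String) × List (List String) × Int × Int :=
  ([["a", "b"], ["c", "d"]], [["a", "#"], [".", "e"]], 1, 1)

def Spec_trocamatriz3 (matriz1 : List (List String)) (matriz2 : List (List String)) (i : Int) (j : Int) (out : List (List String) × List (List String)) : Prop := out = trocamatriz3_alt matriz1 matriz2 i j
instance (matriz1 : List (List String)) (matriz2 : List (List String)) (i : Int) (j : Int) (out : List (List String) × List (List String)) : Decidable (Spec_trocamatriz3 matriz1 matriz2 i j out) := by unfold Spec_trocamatriz3; infer_instance

-- ===== CLAIM (what is proved, stated in full; the proofs are below) =====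
def Claim_equal_trocamatriz3 : Prop := ∀ (matriz1 : List (List String)) (matriz2 : List (List String)) (i : Int) (j : Int), Dom_trocamatriz3 matriz1 matriz2 i j → Pre_trocamatriz3 matriz1 matriz2 i j → Spec_trocamatriz3 matriz1 matriz2 i j (trocamatriz3 matriz1 matriz2 i j)

-- ===== LEMMAS AND PROOFS =====

theorem trocamatriz3_eq_alt (matriz2 : List (List String)) (j : Int) :
    ∀ (n : Nat) (matriz1 : List (List String)) (i : Int), (i+1).toNat ≤ n →
      trocamatriz3 matriz1 matriz2 i j = trocamatriz3_alt matriz1 matriz2 i j := by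
  intro n
  induction n with
  | zero =>
    intro m1 i h
    have hneg : i < 0 := by omega
    rw [trocamatriz3, if_pos hneg]
    unfold trocamatriz3_alt
    rw [PySem.List.pyRange_neg_one_eq_nil (by omega), trocaLoop]
  | succ n ih =>
    intro m1 i h
    by_cases hneg : i < 0
    · rw [trocamatriz3, if_pos hneg]
      unfold trocamatriz3_alt
      rw [PySem.List.pyRange_neg_one_eq_nil (by omega), trocaLoop]
    · rw [trocamatriz3, if_neg hneg]
      unfold trocamatriz3_alt
      rw [PySem.List.pyRange_neg_one_cons (by omega), trocaLoop]
      by_cases h1 : PySem.List.pyGetD (PySem.List.pyGetD matriz2 i []) j "" = "#"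
      · have h2 : PySem.List.pyGetD (PySem.List.pyGetD matriz2 i []) j "" ≠ "X" ∧
            PySem.List.pyGetD (PySem.List.pyGetD matriz2 i []) j "" ≠ "." := by
          rw [h1]; exact ⟨by decide, by decide⟩
        simp only [if_pos h2, if_pos h1]
      · by_cases h2 : PySem.List.pyGetD (PySem.List.pyGetD matriz2 i []) j "" ≠ "X" ∧
            PySem.List.pyGetD (PySem.List.pyGetD matriz2 i []) j "" ≠ "."
        · simp only [if_pos h2, if_neg h1]
          rw [ih _ (i-1) (by omega)]
          unfold trocamatriz3_alt
          rfl
        · simp only [if_neg h2, if_neg h1]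
          rw [ih m1 (i-1) (by omega)]
          unfold trocamatriz3_alt
          rfl

-- ===== VERDICT (by name: the statement is the Claim_ definition above) =====
theorem trocamatriz3_spec : Claim_equal_trocamatriz3 := by
  intro m1 m2 i j _ _
  exact trocamatriz3_eq_alt m2 j (i+1).toNat m1 i le_rfl
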